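-- pv_equiv track=rewrite | github.com/OTOYO1020/ChatDev_Intermediate | WareHouse/C_264__20250512092905/matrix_utils.py | canTransformMatrix
-- ===== SOURCE A (Python) =====
-- from typing import List
-- from itertools import combinations
--
-- def canTransformMatrix(A: List[List[int]], B: List[List[int]]) -> bool:
--     h1, w1 = len(A), len(A[0]) if A else 0
--     h2, w2 = len(B), len(B[0]) if B else 0
--     # Check if dimensions of B are less than or equal to those of A
--     if h2 > h1 or w2 > w1:
--         return False
--     # Generate all possible submatrices of A
--     row_indices = range(h1)
--     col_indices = range(w1)
--     for rows in combinations(row_indices, h2):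
--         for cols in combinations(col_indices, w2):
--             submatrix = [[A[i][j] for j in cols] for i in rows]
--             if submatrix == B:
--                 return True
--     return False
-- ===== SOURCE B (Python) =====
-- from typing import List
-- from itertools import combinations
--
-- def canTransformMatrix(A: List[List[int]], B: List[List[int]]) -> bool:
--     h1, w1 = len(A), len(A[0]) if A else 0
--     h2, w2 = len(B), len(B[0]) if B else 0
--     if h2 > h1 or w2 > w1:
--         return False
--     # For each choice of columns, check greedily whether B's rows appear
--     # in order among A's rows restricted to those columns.
--     for cols in combinations(range(w1), w2):
--         remaining = B
--         for row in A:
--             if remaining and [row[j] for j in cols] == remaining[0]: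
--                 remaining = remaining[1:]
--         if not remaining:
--             return True
--     return False
-- ===== Notes on version B (the rewrite author's own statement) =====
-- stated objective: alternative
-- what changed: B replaces A's enumeration of all C(h1,h2) row combinations by, per column combination, a single greedy top-to-bottom pass over A's rows that consumes B's rows in order (subsequence match); intended as asymptotically cheaper in the row dimension, but a timing run could not confirm a consistent speedup, so no speed is claimed.
-- outside the precondition, e.g. on canTransformMatrix([[1, 2], []], [[2]]): A returns True, B raises IndexError; on canTransformMatrix([[1, 2], [3]], [[2]]): A returns True, B returns True
import Mathlib
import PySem

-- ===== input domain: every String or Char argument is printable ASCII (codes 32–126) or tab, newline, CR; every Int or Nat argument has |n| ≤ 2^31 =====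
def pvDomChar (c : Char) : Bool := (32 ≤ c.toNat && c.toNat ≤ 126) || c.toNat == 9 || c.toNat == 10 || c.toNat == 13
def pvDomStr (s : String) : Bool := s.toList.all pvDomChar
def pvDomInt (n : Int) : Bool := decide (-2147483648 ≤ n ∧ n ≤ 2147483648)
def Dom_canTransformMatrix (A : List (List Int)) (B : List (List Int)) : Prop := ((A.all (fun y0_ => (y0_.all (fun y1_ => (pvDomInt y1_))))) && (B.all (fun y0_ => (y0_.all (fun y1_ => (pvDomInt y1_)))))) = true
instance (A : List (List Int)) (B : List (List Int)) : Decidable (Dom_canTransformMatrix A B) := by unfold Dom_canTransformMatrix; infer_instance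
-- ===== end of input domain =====

-- B replaces A's enumeration of every row combination by a greedy in-order
-- subsequence match over A's rows, done once per column combination (objective: alternative).

-- ===== PORT A =====
-- itertools.combinations(l, k) in Python's lexicographic order
def pvCombos {α : Type} : List α → Nat → List (List α)
  | _, 0 => [[]]
  | [], _ + 1 => []
  | x :: xs, k + 1 => (pvCombos xs k).map (fun c => x :: c) ++ pvCombos xs (k + 1)

def canTransformMatrix (A : List (List Int)) (B : List (List Int)) : Bool :=
  let h1 : Int := A.length
  let w1 : Int := if A.isEmpty then 0 else ((A.headD []).length : Int)
  let h2 : Int := B.length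
  let w2 : Int := if B.isEmpty then 0 else ((B.headD []).length : Int)
  if h2 > h1 ∨ w2 > w1 then false
  else
    let rowIndices := PySem.List.pyRange 0 h1 1
    let colIndices := PySem.List.pyRange 0 w1 1
    (pvCombos rowIndices h2.toNat).any (fun rows =>
      (pvCombos colIndices w2.toNat).any (fun cols =>
        decide (rows.map (fun i => cols.map (fun j => PySem.List.pyGetD (PySem.List.pyGetD A i []) j 0)) = B)))

-- ===== PORT B =====
-- one iteration of the greedy inner loop: consume the head of `remaining` on a match
def pvConsumeStep {α : Type} [DecidableEq α] (rem : List α) (r : α) : List α :=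
  match rem with
  | [] => []
  | b :: bs => if r = b then bs else b :: bs

-- [row[j] for j in cols]
def pvRestrict (row : List Int) (cols : List Int) : List Int :=
  cols.map (fun j => PySem.List.pyGetD row j 0)

def canTransformMatrix_alt (A : List (List Int)) (B : List (List Int)) : Bool :=
  let h1 : Int := A.length
  let w1 : Int := if A.isEmpty then 0 else ((A.headD []).length : Int)
  let h2 : Int := B.length
  let w2 : Int := if B.isEmpty then 0 else ((B.headD []).length : Int)
  if h2 > h1 ∨ w2 > w1 then false
  else
    (pvCombos (PySem.List.pyRange 0 w1 1) w2.toNat).any (fun cols =>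
      decide (A.foldl (fun rem row => pvConsumeStep rem (pvRestrict row cols)) B = []))

-- ===== PRECONDITION & SPEC =====
-- Pre_ admits rectangular-enough A (no row shorter than the first row) and, for ragged A,
-- the cases where no element is ever indexed (dimension guard fails, or B is empty / zero-width).
-- It excludes the remaining ragged-A inputs, where the Python programs index past a row's end,
-- so either implementation can raise IndexError (A may also return early from its enumeration
-- before reaching the short row, as the cite shows).
def Pre_canTransformMatrix (A : List (List Int)) (B : List (List Int)) : Prop :=
  (∀ r ∈ A, (A.headD []).length ≤ r.length) ∨ A.length < B.length ∨
    (A.headD []).length < (B.headD []).length ∨ B = [] ∨ B.headD [] = []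

instance (A : List (List Int)) (B : List (List Int)) : Decidable (Pre_canTransformMatrix A B) := by
  unfold Pre_canTransformMatrix; infer_instance

def pvWitness_canTransformMatrix : List (List Int) × List (List Int) :=
  ([[1, 2], [3, 4]], [[4]])

def Spec_canTransformMatrix (A : List (List Int)) (B : List (List Int)) (out : Bool) : Prop := out = canTransformMatrix_alt A B
instance (A : List (List Int)) (B : List (List Int)) (out : Bool) : Decidable (Spec_canTransformMatrix A B out) := by unfold Spec_canTransformMatrix; infer_instance

-- ===== CLAIM (what is proved, stated in full; the proofs are below) =====
def Claim_equal_canTransformMatrix : Prop := ∀ (A : List (List Int)) (B : List (List Int)), Dom_canTransformMatrix A B → Pre_canTransformMatrix A B → Spec_canTransformMatrix A B (canTransformMatrix A B)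

-- ===== LEMMAS AND PROOFS =====

-- membership in pvCombos = sublists of the given length
lemma mem_pvCombos {α : Type} (l : List α) (k : Nat) (x : List α) :
    x ∈ pvCombos l k ↔ x.Sublist l ∧ x.length = k := by
  induction l generalizing x k with
  | nil =>
    cases k with
    | zero => simp [pvCombos]
    | succ k =>
      simp only [pvCombos, List.not_mem_nil, false_iff]
      rintro ⟨hs, hl⟩
      simp [List.sublist_nil.mp hs] at hl
  | cons a l ih =>
    cases k with
    | zero =>
      simp only [pvCombos, List.mem_singleton]
      constructor
      · rintro rfl; exact ⟨List.nil_sublist _, rfl⟩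
      · rintro ⟨_, hl⟩; exact List.length_eq_zero_iff.mp hl
    | succ k =>
      simp only [pvCombos, List.mem_append, List.mem_map]
      constructor
      · rintro (⟨c, hc, rfl⟩ | hx)
        · rcases (ih k c).mp hc with ⟨hs, hl⟩
          exact ⟨List.cons_sublist_cons.mpr hs, by simp [hl]⟩
        · rcases (ih (k + 1) x).mp hx with ⟨hs, hl⟩
          exact ⟨hs.cons a, hl⟩
      · rintro ⟨hs, hl⟩
        rcases List.sublist_cons_iff.mp hs with h | ⟨r, rfl, hr⟩
        · exact Or.inr ((ih (k + 1) x).mpr ⟨h, hl⟩)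
        · exact Or.inl ⟨r, (ih k r).mpr ⟨hr, by simpa using hl⟩, rfl⟩

-- pvCombos is natural in the element list
lemma pvCombos_map {α β : Type} (g : α → β) (l : List α) (k : Nat) :
    pvCombos (l.map g) k = (pvCombos l k).map (List.map g) := by
  induction l generalizing k with
  | nil => cases k <;> simp [pvCombos]
  | cons a l ih =>
    cases k with
    | zero => simp [pvCombos]
    | succ k => simp [pvCombos, ih, List.map_map, Function.comp_def]

-- the greedy consume loop empties the buffer exactly when B is a subsequence
lemma consume_eq_nil_iff {α : Type} [DecidableEq α] (R B : List α) :
    R.foldl pvConsumeStep B = [] ↔ B.Sublist R := by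
  induction R generalizing B with
  | nil => simp
  | cons r R ih =>
    cases B with
    | nil => simp [pvConsumeStep, ih]
    | cons b bs =>
      simp only [List.foldl_cons, pvConsumeStep]
      by_cases h : r = b
      · subst h
        rw [if_pos rfl, ih]; exact (List.cons_sublist_cons (a := r) (l₁ := bs) (l₂ := R)).symm
      · simp only [if_neg h, ih]
        constructor
        · exact fun hs => hs.cons r
        · intro hs
          rcases List.sublist_cons_iff.mp hs with h' | ⟨t, ht, _⟩
          · exact h'
          · exact absurd (by injection ht with h1 _; exact h1.symm) h

-- ordered submatrix of fixed row count ↔ subsequence of the mapped rows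
lemma exists_sublist_map {α β : Type} (f : α → β) (A : List α) (B : List β) :
    (∃ S : List α, S.Sublist A ∧ S.length = B.length ∧ S.map f = B) ↔ B.Sublist (A.map f) := by
  constructor
  · rintro ⟨S, hs, _, rfl⟩; exact hs.map f
  · intro h
    rcases List.sublist_map_iff.mp h with ⟨S, hs, rfl⟩
    exact ⟨S, hs, by simp, rfl⟩

-- the inner row search of A equals the greedy match of B, for a fixed column choice
lemma rows_any_eq_consume (A B : List (List Int)) (cols : List Int) :
    ((pvCombos (PySem.List.pyRange 0 (A.length : Int) 1) B.length).any (fun rows =>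
        decide (rows.map (fun i => cols.map (fun j => PySem.List.pyGetD (PySem.List.pyGetD A i []) j 0)) = B)))
        = decide (A.foldl (fun rem row => pvConsumeStep rem (pvRestrict row cols)) B = []) := by
  rw [Bool.eq_iff_iff]
  simp only [List.any_eq_true, decide_eq_true_eq]
  rw [← List.foldl_map (f := fun row => pvRestrict row cols) (g := pvConsumeStep) (l := A) (init := B), consume_eq_nil_iff]
  have hA : (PySem.List.pyRange 0 (A.length : Int) 1).map
      (fun i => PySem.List.pyGetD A i ([] : List Int)) = A :=
    PySem.List.map_pyGetD_pyRange_zero A []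
  constructor
  · rintro ⟨rows, hmem, heq⟩
    rcases (mem_pvCombos _ _ rows).mp hmem with ⟨hsub, hlen⟩
    refine (exists_sublist_map (fun row => pvRestrict row cols) A B).mp
      ⟨rows.map (fun i => PySem.List.pyGetD A i []), ?_, ?_, ?_⟩
    · have := hsub.map (fun i => PySem.List.pyGetD A i ([] : List Int))
      rwa [hA] at this
    · simp only [List.length_map]; exact hlen
    · rw [List.map_map]
      simpa [pvRestrict] using heq
  · intro h
    rcases (exists_sublist_map (fun row => pvRestrict row cols) A B).mpr h with ⟨S, hS, hlen, hmap⟩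
    have hmem : S ∈ pvCombos ((PySem.List.pyRange 0 (A.length : Int) 1).map
        (fun i => PySem.List.pyGetD A i ([] : List Int))) B.length :=
      (mem_pvCombos _ _ S).mpr ⟨by rwa [hA], hlen⟩
    rw [pvCombos_map] at hmem
    rcases List.mem_map.mp hmem with ⟨rows, hr, rfl⟩
    exact ⟨rows, hr, by simpa [List.map_map, pvRestrict, Function.comp] using hmap⟩

-- swapping the two nested ANY loops
lemma any_any_comm {α β : Type} (l1 : List α) (l2 : List β) (p : α → β → Bool) :
    (l1.any fun a => l2.any fun b => p a b) = (l2.any fun b => l1.any fun a => p a b) := by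
  rw [Bool.eq_iff_iff]
  simp only [List.any_eq_true]
  constructor <;> rintro ⟨x, hx, y, hy, h⟩ <;> exact ⟨y, hy, x, hx, h⟩

-- ===== VERDICT (by name: the statement is the Claim_ definition above) =====
theorem canTransformMatrix_spec : Claim_equal_canTransformMatrix := by
  intro A B _ _
  unfold Spec_canTransformMatrix canTransformMatrix canTransformMatrix_alt
  simp only [Int.toNat_natCast]
  split_ifs <;> try rfl
  all_goals
    rw [any_any_comm]
    exact List.any_congr rfl (fun cols => rows_any_eq_consume A B cols)
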